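-- pv_equiv track=rewrite | github.com/kliffeup/ppl-2019-virtual-memory-kliffeup | add/utest_all_fuction.py | clearing_of_frame_opt
-- ===== SOURCE A (Python) =====
-- def clearing_of_frame_opt(frames_op_memory, remain_query_sequence):
--     for i in range(len(frames_op_memory)):
--         if remain_query_sequence.count(frames_op_memory[i][0]):
--             frames_op_memory[i][1] = remain_query_sequence.index(frames_op_memory[i][0]) + 1
--     for i in range(len(frames_op_memory)):
--         if frames_op_memory[i][1] == 0:
--             never_used_page_again = i
--             return never_used_page_again
--     max_using_range = 0
--     for i in frames_op_memory:
--         if i[1] > max_using_range: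
--             max_using_range = i[1]
--     for i in range(len(frames_op_memory)):
--         if frames_op_memory[i][1] == max_using_range:
--             longest_unused_page = i
--             return longest_unused_page
-- ===== SOURCE B (Python) =====
-- def clearing_of_frame_opt(frames_op_memory, remain_query_sequence):
--     # index of the first occurrence of each query, built once (replaces count/index rescans)
--     first_pos = {}
--     for j, q in enumerate(remain_query_sequence):
--         if q not in first_pos:
--             first_pos[q] = j + 1
--     # same in-place mutation as the original: record next-use distance per frame
--     for frame in frames_op_memory:
--         if frame[0] in first_pos:
--             frame[1] = first_pos[frame[0]]
--     if not frames_op_memory: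
--         return None
--     # single argmax pass: a 0 means "never used again" (+infinity) and freezes the answer;
--     # otherwise keep the first index holding the strictly largest value
--     best_i = 0
--     best_v = frames_op_memory[0][1]
--     for i in range(1, len(frames_op_memory)):
--         v = frames_op_memory[i][1]
--         if best_v != 0 and (v == 0 or v > best_v):
--             best_i, best_v = i, v
--     return best_i
-- ===== Notes on version B (the rewrite author's own statement) =====
-- stated objective: faster
-- what changed: B builds a first-occurrence position dict once instead of calling count/index on the remaining sequence for every frame, and replaces A's three trailing scans (find-first-zero, fold-max, find-first-max) by a single argmax pass in which a 0 counter acts as +infinity and freezes the answer; the in-place frame[1] mutation is preserved.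
-- outside the precondition, e.g. on clearing_of_frame_opt([[1, 0], [4]], []): A returns 0, B raises IndexError; on clearing_of_frame_opt([[1, -5]], []): A returns None, B returns 0
import Mathlib
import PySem

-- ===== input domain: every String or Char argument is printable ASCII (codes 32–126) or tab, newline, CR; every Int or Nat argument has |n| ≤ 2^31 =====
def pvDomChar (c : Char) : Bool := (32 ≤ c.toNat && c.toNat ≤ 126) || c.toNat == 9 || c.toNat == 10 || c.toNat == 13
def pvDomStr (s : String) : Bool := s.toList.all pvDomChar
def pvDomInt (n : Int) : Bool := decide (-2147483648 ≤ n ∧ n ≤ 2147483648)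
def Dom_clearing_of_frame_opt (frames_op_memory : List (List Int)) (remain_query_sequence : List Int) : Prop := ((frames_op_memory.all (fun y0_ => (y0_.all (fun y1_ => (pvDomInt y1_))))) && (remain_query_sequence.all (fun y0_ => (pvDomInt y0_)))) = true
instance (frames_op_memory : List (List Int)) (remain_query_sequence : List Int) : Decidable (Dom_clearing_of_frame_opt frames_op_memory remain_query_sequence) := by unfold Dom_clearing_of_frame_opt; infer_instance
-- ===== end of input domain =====

-- B replaces A's per-frame count/index rescans by a first-occurrence dict and A's three trailing
-- scans by one argmax pass (0 = +infinity); both mutate frame[1] in place in Python, and the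
-- equivalence proved here is about the return value (the mutation is identical in both).


-- ===== PORT A =====
-- loop 1: for each frame, if remain.count(frame[0]) ≠ 0, set frame[1] = remain.index(frame[0]) + 1
def pvMutA (remain : List Int) (f : List Int) : List Int :=
  if PySem.List.count remain (PySem.List.pyGetD f 0 0) ≠ 0 then
    PySem.List.pySetD f 1 (((PySem.List.index? remain (PySem.List.pyGetD f 0 0)).getD 0 : Int) + 1)
  else f

-- loop 2: return the first index whose frame[1] == 0
def pvFindZeroA : List (List Int) → Int → Option Int
  | [], _ => none
  | f :: r, i => if PySem.List.pyGetD f 1 0 = 0 then some i else pvFindZeroA r (i + 1)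

-- loop 4: return the first index whose frame[1] == max_using_range
def pvFindEqA : List (List Int) → Int → Int → Option Int
  | [], _, _ => none
  | f :: r, m, i => if PySem.List.pyGetD f 1 0 = m then some i else pvFindEqA r m (i + 1)

def clearing_of_frame_opt (frames_op_memory : List (List Int)) (remain_query_sequence : List Int) : Int :=
  let fr := frames_op_memory.map (pvMutA remain_query_sequence)
  match pvFindZeroA fr 0 with
  | some i => i
  | none =>
    -- loop 3: max_using_range = running maximum of frame[1] starting from 0
    let mx := fr.foldl (fun m f => if PySem.List.pyGetD f 1 0 > m then PySem.List.pyGetD f 1 0 else m) 0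
    (pvFindEqA fr mx 0).getD (-1)   -- Python falls off the end (None) when nothing matches; outside Pre_

-- ===== PORT B =====
-- first_pos: first-occurrence index + 1 of each query value
def pvFirstPos (remain : List Int) : PySem.Dict Int Int :=
  (PySem.List.enumerate remain 0).foldl
    (fun d jq => if PySem.Dict.contains d jq.2 then d else PySem.Dict.insert d jq.2 (jq.1 + 1))
    PySem.Dict.empty

def pvMutB (pos : PySem.Dict Int Int) (f : List Int) : List Int :=
  match PySem.Dict.get? pos (PySem.List.pyGetD f 0 0) with
  | some v => PySem.List.pySetD f 1 v
  | none => f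

-- single argmax pass: a best value 0 is +infinity and freezes the answer
def pvArgmaxB : List (List Int) → Int → Int → Int → Int
  | [], bi, _, _ => bi
  | f :: r, bi, bv, i =>
    let v := PySem.List.pyGetD f 1 0
    if bv ≠ 0 ∧ (v = 0 ∨ v > bv) then pvArgmaxB r i v (i + 1)
    else pvArgmaxB r bi bv (i + 1)

def clearing_of_frame_opt_alt (frames_op_memory : List (List Int)) (remain_query_sequence : List Int) : Int :=
  let fr := frames_op_memory.map (pvMutB (pvFirstPos remain_query_sequence))
  match fr with
  | [] => -1   -- Python B returns None on an empty frame list; outside Pre_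
  | f :: r => pvArgmaxB r 0 (PySem.List.pyGetD f 1 0) 1

-- ===== PRECONDITION & SPEC =====
-- Pre_ excludes: the empty frame list and inputs where every effective counter is negative (A falls
-- off the end and returns None, not an int), and frame lists containing an inner list shorter than 2
-- (A raises on them unless an earlier frame returns first, in which case B raises IndexError).
def Pre_clearing_of_frame_opt (frames_op_memory : List (List Int)) (remain_query_sequence : List Int) : Prop :=
  frames_op_memory ≠ [] ∧ (∀ f ∈ frames_op_memory, 2 ≤ f.length) ∧
  ∃ f ∈ frames_op_memory, f.getD 0 0 ∈ remain_query_sequence ∨ 0 ≤ f.getD 1 0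
instance (frames_op_memory : List (List Int)) (remain_query_sequence : List Int) : Decidable (Pre_clearing_of_frame_opt frames_op_memory remain_query_sequence) := by unfold Pre_clearing_of_frame_opt; infer_instance

def pvWitness_clearing_of_frame_opt : List (List Int) × List Int := ([[1, 0], [2, 3]], [2])

def Spec_clearing_of_frame_opt (frames_op_memory : List (List Int)) (remain_query_sequence : List Int) (out : Int) : Prop := out = clearing_of_frame_opt_alt frames_op_memory remain_query_sequence
instance (frames_op_memory : List (List Int)) (remain_query_sequence : List Int) (out : Int) : Decidable (Spec_clearing_of_frame_opt frames_op_memory remain_query_sequence out) := by unfold Spec_clearing_of_frame_opt; infer_instance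

-- ===== CLAIM (what is proved, stated in full; the proofs are below) =====
def Claim_equal_clearing_of_frame_opt : Prop := ∀ (frames_op_memory : List (List Int)) (remain_query_sequence : List Int), Dom_clearing_of_frame_opt frames_op_memory remain_query_sequence → Pre_clearing_of_frame_opt frames_op_memory remain_query_sequence → Spec_clearing_of_frame_opt frames_op_memory remain_query_sequence (clearing_of_frame_opt frames_op_memory remain_query_sequence)

-- ===== LEMMAS AND PROOFS =====

theorem pvFirstPosAux (l : List Int) (s : Int) (d : PySem.Dict Int Int) (q : Int) :
    PySem.Dict.get?
      ((PySem.List.enumerate l s).foldl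
        (fun d jq => if PySem.Dict.contains d jq.2 then d else PySem.Dict.insert d jq.2 (jq.1 + 1)) d) q
    = if PySem.Dict.contains d q then PySem.Dict.get? d q
      else (PySem.List.index? l q).map (fun n : Nat => ((n : Int) + s + 1)) := by
  induction l generalizing s d with
  | nil =>
    rw [PySem.List.enumerate_nil]
    simp only [List.foldl_nil]
    have : PySem.List.index? ([] : List Int) q = none := by
      rw [PySem.List.index?_eq_none_iff]; simp
    rw [this]
    by_cases hdq : PySem.Dict.contains d q = true
    · simp [hdq]
    · have : PySem.Dict.get? d q = none := by
        have := PySem.Dict.contains_eq_isSome_get? d q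
        rw [this] at hdq; simpa using hdq
      simp [hdq, this]
  | cons x l ih =>
    rw [PySem.List.enumerate_cons]
    simp only [List.foldl_cons]
    by_cases hdx : PySem.Dict.contains d x = true
    · simp only [hdx, if_true]
      rw [ih]
      by_cases hq : q = x
      · subst hq
        simp only [hdx, if_true]
      · rw [PySem.List.index?_cons_of_ne l (show x ≠ q from fun h => hq h.symm)]
        by_cases hdq : PySem.Dict.contains d q = true
        · simp [hdq]
        · simp only [hdq, if_false, Bool.false_eq_true]
          cases PySem.List.index? l q
          · simp
          · simp; ring
    · simp only [hdx, if_false, Bool.false_eq_true]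
      rw [ih]
      by_cases hq : q = x
      · subst hq
        have hc : PySem.Dict.contains (PySem.Dict.insert d q (s + 1)) q = true := by
          rw [PySem.Dict.contains_eq_isSome_get?, PySem.Dict.get?_insert_self]; rfl
        rw [PySem.List.index?_cons_self]
        simp [hc, hdx, PySem.Dict.get?_insert_self]
      · have hc : PySem.Dict.contains (PySem.Dict.insert d x (s + 1)) q = PySem.Dict.contains d q := by
          rw [PySem.Dict.contains_eq_isSome_get?, PySem.Dict.contains_eq_isSome_get?,
            PySem.Dict.get?_insert_of_ne d _ hq]
        rw [hc, PySem.Dict.get?_insert_of_ne d _ hq,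
          PySem.List.index?_cons_of_ne l (show x ≠ q from fun h => hq h.symm)]
        by_cases hdq : PySem.Dict.contains d q = true
        · simp [hdq]
        · simp only [hdq, if_false, Bool.false_eq_true]
          cases PySem.List.index? l q
          · simp
          · simp; ring

def pvVal (f : List Int) : Int := PySem.List.pyGetD f 1 0

theorem pvFirstPos_get?' (remain : List Int) (q : Int) :
    PySem.Dict.get?
      ((PySem.List.enumerate remain 0).foldl
        (fun d jq => if PySem.Dict.contains d jq.2 then d else PySem.Dict.insert d jq.2 (jq.1 + 1))
        PySem.Dict.empty) q
      = (PySem.List.index? remain q).map (fun n : Nat => ((n : Int) + 1)) := by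
  rw [pvFirstPosAux]
  have hc : PySem.Dict.contains (PySem.Dict.empty : PySem.Dict Int Int) q = false := by
    rw [PySem.Dict.contains_eq_isSome_get?]
    simp [PySem.Dict.get?, PySem.Dict.empty]
  simp [hc]

theorem pvFoldMax (l : List (List Int)) (a : Int) :
    l.foldl (fun m f => if PySem.List.pyGetD f 1 0 > m then PySem.List.pyGetD f 1 0 else m) a
      = (l.map pvVal).foldl max a := by
  induction l generalizing a with
  | nil => rfl
  | cons f r ih =>
    simp only [List.foldl_cons, List.map_cons]
    rw [ih]
    congr 1
    simp only [pvVal, max_def]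
    split_ifs <;> omega

def pvFz : List (List Int) → Option Nat
  | [] => none
  | f :: r => if pvVal f = 0 then some 0 else (pvFz r).map (· + 1)

theorem pvArgmaxB_zero (l : List (List Int)) (bi i : Int) : pvArgmaxB l bi 0 i = bi := by
  induction l generalizing i with
  | nil => rfl
  | cons f r ih => simp [pvArgmaxB, ih]

theorem pvFindZeroA_some (l : List (List Int)) (k : Nat) (h : pvFz l = some k) (i : Int) :
    pvFindZeroA l i = some (i + k) := by
  induction l generalizing k i with
  | nil => simp [pvFz] at h
  | cons f r ih =>
    rw [pvFindZeroA]
    by_cases h0 : pvVal f = 0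
    · simp [pvFz, h0] at h
      subst h
      simp [pvVal] at h0 ⊢
      simp [h0]
    · simp [pvFz, h0] at h
      obtain ⟨k', hk', rfl⟩ := h
      rw [if_neg (by simpa [pvVal] using h0)]
      rw [ih _ hk']
      congr 1
      push_cast
      ring

theorem pvFindZeroA_none (l : List (List Int)) (h : pvFz l = none) (i : Int) :
    pvFindZeroA l i = none := by
  induction l generalizing i with
  | nil => rfl
  | cons f r ih =>
    by_cases h0 : pvVal f = 0
    · simp [pvFz, h0] at h
    · simp [pvFz, h0] at h
      rw [pvFindZeroA, if_neg (by simpa [pvVal] using h0)]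
      exact ih h _

theorem pvArgmaxB_first_zero (l : List (List Int)) (k : Nat) (h : pvFz l = some k)
    (bi bv i : Int) (hbv : bv ≠ 0) : pvArgmaxB l bi bv i = i + k := by
  induction l generalizing k bi bv i with
  | nil => simp [pvFz] at h
  | cons f r ih =>
    rw [pvArgmaxB]
    by_cases h0 : pvVal f = 0
    · simp [pvFz, h0] at h
      subst h
      have : PySem.List.pyGetD f 1 0 = 0 := h0
      rw [if_pos ⟨hbv, Or.inl this⟩, this, pvArgmaxB_zero]
      simp
    · simp [pvFz, h0] at h
      obtain ⟨k', hk', rfl⟩ := h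
      have hv : PySem.List.pyGetD f 1 0 ≠ 0 := h0
      split_ifs with hcond
      · rcases hcond with ⟨-, hor⟩
        rcases hor with h' | h'
        · exact absurd h' hv
        · rw [ih _ hk' _ _ _ hv]; push_cast; ring
      · rw [ih _ hk' _ _ _ hbv]; push_cast; ring

theorem pvFindEqA_isSome (l : List (List Int)) (m : Int) (h : ∃ g ∈ l, pvVal g = m) (i : Int) :
    (pvFindEqA l m i).isSome := by
  induction l generalizing i with
  | nil => simp at h
  | cons f r ih =>
    rw [pvFindEqA]
    by_cases hf : PySem.List.pyGetD f 1 0 = m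
    · simp [hf]
    · rw [if_neg hf]
      apply ih
      rcases h with ⟨g, hg, hgm⟩
      rcases List.mem_cons.mp hg with rfl | hg'
      · exact absurd (by simpa [pvVal] using hgm) hf
      · exact ⟨g, hg', hgm⟩

theorem pvFoldlMax_init_le (t : List Int) (a b : Int) (hab : a ≤ b) :
    t.foldl max a ≤ t.foldl max b := by
  rcases PySem.List.foldl_max_mem t a with h | h
  · calc t.foldl max a = a := h
      _ ≤ b := hab
      _ ≤ t.foldl max b := (PySem.List.le_foldl_max t b).1
  · exact (PySem.List.le_foldl_max t b).2 _ h

theorem pvArgmaxB_no_zero (l : List (List Int)) (bi bv i : Int)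
    (hz : ∀ g ∈ l, pvVal g ≠ 0) (hbv : bv ≠ 0) :
    pvArgmaxB l bi bv i
      = if (l.map pvVal).foldl max bv > bv
        then (pvFindEqA l ((l.map pvVal).foldl max bv) i).getD bi
        else bi := by
  induction l generalizing bi bv i with
  | nil => simp [pvArgmaxB]
  | cons f r ih =>
    have hv : pvVal f ≠ 0 := hz f (List.mem_cons_self)
    have hzr : ∀ g ∈ r, pvVal g ≠ 0 := fun g hg => hz g (List.mem_cons_of_mem _ hg)
    rw [pvArgmaxB]
    simp only [show PySem.List.pyGetD f 1 0 = pvVal f from rfl]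
    simp only [List.map_cons, List.foldl_cons]
    by_cases hgt : pvVal f > bv
    · rw [if_pos ⟨hbv, Or.inr (by simpa [pvVal] using hgt)⟩]
      rw [ih _ _ _ hzr hv]
      have hmaxv : max bv (pvVal f) = pvVal f := max_eq_right (le_of_lt hgt)
      rw [hmaxv]
      set M := (r.map pvVal).foldl max (pvVal f) with hM
      have hMv : pvVal f ≤ M := (PySem.List.le_foldl_max _ _).1
      have hMbv : bv < M := lt_of_lt_of_le hgt hMv
      rw [if_pos hMbv]
      by_cases hMeq : M = pvVal f
      · -- head attains the max: findEq stops at i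
        rw [if_neg (by omega)]
        rw [pvFindEqA, if_pos (by simpa [pvVal] using hMeq.symm)]
        simp
      · have hMgt : pvVal f < M := lt_of_le_of_ne hMv (fun h => hMeq h.symm)
        rw [if_pos hMgt]
        rw [pvFindEqA, if_neg (by simpa [pvVal] using (show pvVal f ≠ M by omega))]
        -- attained in r, so the defaults i / bi do not matter
        have hmem : ∃ g ∈ r, pvVal g = M := by
          rcases PySem.List.foldl_max_mem (r.map pvVal) (pvVal f) with h | h
          · exact absurd (hM ▸ h) hMeq
          · rcases List.mem_map.mp (hM ▸ h) with ⟨g, hg, hge⟩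
            exact ⟨g, hg, hge⟩
        have := pvFindEqA_isSome r M hmem (i + 1)
        cases hfe : pvFindEqA r M (i + 1) with
        | none => rw [hfe] at this; simp at this
        | some j => simp
    · rw [if_neg (by
        rintro ⟨-, h | h⟩
        · exact hv (by simpa [pvVal] using h)
        · exact hgt (by simpa [pvVal] using h))]
      rw [ih _ _ _ hzr hbv]
      have hmaxv : max bv (pvVal f) = bv := max_eq_left (by omega)
      rw [hmaxv]
      by_cases hMgt : (r.map pvVal).foldl max bv > bv
      · rw [if_pos hMgt, if_pos hMgt]
        rw [pvFindEqA, if_neg (by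
          simp only [pvVal] at hgt
          intro h
          have := (show pvVal f < (r.map pvVal).foldl max bv by
            simp only [pvVal]; omega)
          simp only [pvVal] at this
          omega)]
      · rw [if_neg hMgt, if_neg hMgt]

theorem pvFz_none (l : List (List Int)) (h : pvFz l = none) : ∀ g ∈ l, pvVal g ≠ 0 := by
  induction l with
  | nil => simp
  | cons f r ih =>
    by_cases h0 : pvVal f = 0
    · simp [pvFz, h0] at h
    · simp [pvFz, h0] at h
      intro g hg
      rcases List.mem_cons.mp hg with rfl | hg'
      · exact h0
      · exact ih h g hg'

theorem clearing_tail_eq (f : List Int) (r : List (List Int))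
    (hpos : ∃ g ∈ f :: r, 0 ≤ pvVal g) :
    (match pvFindZeroA (f :: r) 0 with
     | some i => i
     | none =>
       (pvFindEqA (f :: r)
         ((f :: r).foldl (fun m f => if PySem.List.pyGetD f 1 0 > m then PySem.List.pyGetD f 1 0 else m) 0)
         0).getD (-1))
    = pvArgmaxB r 0 (PySem.List.pyGetD f 1 0) 1 := by
  simp only [show PySem.List.pyGetD f 1 0 = pvVal f from rfl]
  cases hfz : pvFz (f :: r) with
  | some k =>
    rw [pvFindZeroA_some _ _ hfz 0]
    simp only [zero_add]
    by_cases h0 : pvVal f = 0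
    · simp [pvFz, h0] at hfz
      subst hfz
      rw [h0, pvArgmaxB_zero]
      simp
    · simp [pvFz, h0] at hfz
      obtain ⟨k', hk', rfl⟩ := hfz
      rw [pvArgmaxB_first_zero r k' hk' 0 (pvVal f) 1 h0]
      push_cast; ring
  | none =>
    have hz := pvFz_none _ hfz
    have hzf : pvVal f ≠ 0 := hz f List.mem_cons_self
    have hzr : ∀ g ∈ r, pvVal g ≠ 0 := fun g hg => hz g (List.mem_cons_of_mem _ hg)
    rw [pvFindZeroA_none _ hfz 0]
    simp only [pvFoldMax]
    rw [pvArgmaxB_no_zero r 0 (pvVal f) 1 hzr hzf]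
    -- some counter is strictly positive
    have hposs : ∃ g ∈ f :: r, 0 < pvVal g := by
      rcases hpos with ⟨g, hg, hge⟩
      exact ⟨g, hg, lt_of_le_of_ne hge (fun h => hz g hg h.symm)⟩
    simp only [List.map_cons, List.foldl_cons]
    by_cases hv0 : 0 < pvVal f
    · rw [max_eq_right (le_of_lt hv0)]
      set M := (r.map pvVal).foldl max (pvVal f) with hM
      have hMv : pvVal f ≤ M := (PySem.List.le_foldl_max _ _).1
      by_cases hMgt : pvVal f < M
      · rw [if_pos hMgt]
        rw [pvFindEqA, if_neg (by simp only [pvVal] at hMgt ⊢; omega)]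
        have hmem : ∃ g ∈ r, pvVal g = M := by
          rcases PySem.List.foldl_max_mem (r.map pvVal) (pvVal f) with h | h
          · exact absurd (hM ▸ h) (by omega)
          · rcases List.mem_map.mp (hM ▸ h) with ⟨g, hg, hge⟩
            exact ⟨g, hg, hge⟩
        have := pvFindEqA_isSome r M hmem 1
        cases hfe : pvFindEqA r M 1 with
        | none => rw [hfe] at this; simp at this
        | some j => simp [hfe]
      · have hMeq : M = pvVal f := le_antisymm (by omega) hMv
        rw [if_neg (by omega)]
        rw [hMeq, pvFindEqA, if_pos (show PySem.List.pyGetD f 1 0 = pvVal f from rfl)]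
        simp
    · -- pvVal f < 0: the positive counter lives in r; both inits give the same max
      have hvneg : pvVal f < 0 := by
        rcases lt_trichotomy (pvVal f) 0 with h | h | h
        · exact h
        · exact absurd h hzf
        · exact absurd h hv0
      rcases hposs with ⟨g, hg, hgpos⟩
      have hgr : g ∈ r := by
        rcases List.mem_cons.mp hg with rfl | h
        · omega
        · exact h
      rw [max_eq_left (by omega)]
      set M0 := (r.map pvVal).foldl max 0 with hM0
      set M1 := (r.map pvVal).foldl max (pvVal f) with hM1
      have hgmem : pvVal g ∈ r.map pvVal := List.mem_map.mpr ⟨g, hgr, rfl⟩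
      have hM0pos : 0 < M0 := lt_of_lt_of_le hgpos ((PySem.List.le_foldl_max _ _).2 _ hgmem)
      have hM1pos : 0 < M1 := lt_of_lt_of_le hgpos ((PySem.List.le_foldl_max _ _).2 _ hgmem)
      have hEq : M1 = M0 := by
        apply le_antisymm
        · exact pvFoldlMax_init_le _ _ _ (by omega)
        · rcases PySem.List.foldl_max_mem (r.map pvVal) 0 with h | h
          · omega
          · exact (PySem.List.le_foldl_max (r.map pvVal) (pvVal f)).2 _ (hM0 ▸ h)
      rw [if_pos (by omega)]
      rw [hEq]
      rw [pvFindEqA, if_neg (by simp only [pvVal] at hM0pos hvneg ⊢; omega)]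
      have hmem0 : ∃ g' ∈ r, pvVal g' = M0 := by
        rcases PySem.List.foldl_max_mem (r.map pvVal) 0 with h | h
        · omega
        · rcases List.mem_map.mp (hM0 ▸ h) with ⟨g', hg', hge⟩
          exact ⟨g', hg', hge⟩
      have := pvFindEqA_isSome r M0 hmem0 1
      cases hfe : pvFindEqA r M0 1 with
      | none => rw [hfe] at this; simp at this
      | some j => simp [hfe]

theorem pvMut_eq (remain : List Int) (f : List Int) :
    pvMutA remain f = pvMutB (pvFirstPos remain) f := by
  unfold pvMutA pvMutB pvFirstPos
  set q := PySem.List.pyGetD f 0 0 with hq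
  rw [pvFirstPos_get?' remain q]
  by_cases hmem : q ∈ remain
  · have hcnt : PySem.List.count remain q ≠ 0 := by
      rw [PySem.List.count_eq]
      have := List.count_pos_iff.mpr hmem
      omega
    rcases Option.isSome_iff_exists.mp ((PySem.List.index?_isSome_iff remain q).mpr hmem) with ⟨n, hn⟩
    rw [if_pos hcnt, hn]
    simp
  · have hcnt : PySem.List.count remain q = 0 := by
      rw [PySem.List.count_eq]
      exact List.count_eq_zero.mpr hmem
    have hidx : PySem.List.index? remain q = none := (PySem.List.index?_eq_none_iff remain q).mpr hmem
    rw [if_neg (by simpa using hcnt), hidx]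
    rfl

theorem pvMut_val_nonneg (remain : List Int) (f : List Int) (hlen : 2 ≤ f.length)
    (h : f.getD 0 0 ∈ remain ∨ 0 ≤ f.getD 1 0) : 0 ≤ pvVal (pvMutA remain f) := by
  unfold pvMutA pvVal
  have hq : PySem.List.pyGetD f 0 0 = f.getD 0 0 := PySem.List.pyGetD_zero f 0
  by_cases hmem : f.getD 0 0 ∈ remain
  · have hcnt : PySem.List.count remain (PySem.List.pyGetD f 0 0) ≠ 0 := by
      rw [hq, PySem.List.count_eq]
      have := List.count_pos_iff.mpr hmem
      omega
    rw [if_pos hcnt]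
    rw [PySem.List.pySetD_of_nonneg f _ (by norm_num)]
    rw [PySem.List.pyGetD_eq_getElem _ _ (by norm_num) (by simp; omega)]
    have h1 : ((1:Int).toNat) = 1 := rfl
    simp only [h1, List.getElem_set_self]
    positivity
  · rcases h with h | h
    · exact absurd h hmem
    · by_cases hcnt : PySem.List.count remain (PySem.List.pyGetD f 0 0) ≠ 0
      · exfalso
        apply hmem
        rw [hq, PySem.List.count_eq] at hcnt
        exact List.count_pos_iff.mp (by omega)
      · rw [if_neg hcnt]
        rw [PySem.List.pyGetD_eq_getElem _ _ (by norm_num) (by simp; omega)]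
        rw [List.getD_eq_getElem f 0 (by omega)] at h
        simpa using h

-- ===== VERDICT (by name: the statement is the Claim_ definition above) =====
theorem clearing_of_frame_opt_spec : Claim_equal_clearing_of_frame_opt := by
  intro frames rq _ hpre
  obtain ⟨hne, hlen, f0, hf0, hcond⟩ := hpre
  unfold Spec_clearing_of_frame_opt
  simp only [clearing_of_frame_opt, clearing_of_frame_opt_alt]
  have hmap : frames.map (pvMutB (pvFirstPos rq)) = frames.map (pvMutA rq) :=
    List.map_congr_left (fun f _ => (pvMut_eq rq f).symm)
  rw [hmap]
  have hpos : ∃ g ∈ frames.map (pvMutA rq), 0 ≤ pvVal g :=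
    ⟨pvMutA rq f0, List.mem_map.mpr ⟨f0, hf0, rfl⟩,
      pvMut_val_nonneg rq f0 (hlen f0 hf0) hcond⟩
  cases hfr : frames.map (pvMutA rq) with
  | nil => exact absurd (List.map_eq_nil_iff.mp hfr) hne
  | cons f r =>
    rw [hfr] at hpos
    exact clearing_tail_eq f r hpos
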